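-- pv_equiv track=rewrite | github.com/KhaledQasim/FormValidation | backend/app/database/schemas.py | check_password_syntax
-- ===== SOURCE A (Python) =====
-- def check_password_syntax(password: str):
--     special_symbols = '!£$%^&*-_+=:;@~#?'
--
--     if (len(password) < 8):
--         return False
--
--     if (len(password) > 30):
--         return False
--
--     if not any(char.islower() for char in password):
--         return False
--
--     if not any(char.isupper() for char in password):
--         return False
--
--     if not any(char.isdigit() for char in password):
--         return False
--
--     if not any(char in special_symbols for char in password):
--         return False
--
--     return True
-- ===== SOURCE B (Python) =====
-- def check_password_syntax(password: str):
--     special_symbols = '!£$%^&*-_+=:;@~#?'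
--
--     if len(password) < 8 or len(password) > 30:
--         return False
--
--     has_lower = has_upper = has_digit = has_special = False
--     for char in password:
--         if char.islower():
--             has_lower = True
--         if char.isupper():
--             has_upper = True
--         if char.isdigit():
--             has_digit = True
--         if char in special_symbols:
--             has_special = True
--     return has_lower and has_upper and has_digit and has_special
-- ===== Notes on version B (the rewrite author's own statement) =====
-- stated objective: simpler
-- what changed: Merged the two length guards into one test and fused the four separate any() scans of the password into a single loop that maintains four boolean flags.
import Mathlib
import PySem

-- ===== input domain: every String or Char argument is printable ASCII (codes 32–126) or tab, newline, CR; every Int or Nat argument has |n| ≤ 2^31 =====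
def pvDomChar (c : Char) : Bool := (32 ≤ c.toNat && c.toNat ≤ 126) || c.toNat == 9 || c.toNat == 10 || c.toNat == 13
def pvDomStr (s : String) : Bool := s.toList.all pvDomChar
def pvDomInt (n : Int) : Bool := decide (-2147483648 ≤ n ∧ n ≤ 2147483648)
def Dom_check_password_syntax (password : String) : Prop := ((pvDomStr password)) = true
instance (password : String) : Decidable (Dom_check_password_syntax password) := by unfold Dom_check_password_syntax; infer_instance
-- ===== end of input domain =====

-- B merges the two length guards and fuses A's four any() scans into one flag-maintaining pass (objective: simpler).

-- ===== PORT A =====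
def pvSpecialSymbols : List Char := "!£$%^&*-_+=:;@~#?".toList

def check_password_syntax (password : String) : Bool :=
  if PySem.Str.len password < 8 then false
  else if PySem.Str.len password > 30 then false
  else if !(password.toList.any (fun c => PySem.Chars.islower c)) then false
  else if !(password.toList.any (fun c => PySem.Chars.isupper c)) then false
  else if !(password.toList.any (fun c => PySem.Chars.isdigit c)) then false
  else if !(password.toList.any (fun c => c ∈ pvSpecialSymbols)) then false
  else true

-- ===== PORT B =====
-- one pass: fold updating the four flags (has_lower, has_upper, has_digit, has_special)
def pvStep (f : Bool × Bool × Bool × Bool) (c : Char) : Bool × Bool × Bool × Bool :=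
  (f.1 || PySem.Chars.islower c,
   f.2.1 || PySem.Chars.isupper c,
   f.2.2.1 || PySem.Chars.isdigit c,
   f.2.2.2 || decide (c ∈ pvSpecialSymbols))

def check_password_syntax_alt (password : String) : Bool :=
  if PySem.Str.len password < 8 || PySem.Str.len password > 30 then false
  else
    let f := password.toList.foldl pvStep (false, false, false, false)
    f.1 && f.2.1 && f.2.2.1 && f.2.2.2

-- ===== PRECONDITION & SPEC =====
def Spec_check_password_syntax (password : String) (out : Bool) : Prop := out = check_password_syntax_alt password
instance (password : String) (out : Bool) : Decidable (Spec_check_password_syntax password out) := by unfold Spec_check_password_syntax; infer_instance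

-- ===== CLAIM (what is proved, stated in full; the proofs are below) =====
def Claim_equal_check_password_syntax : Prop := ∀ (password : String), Dom_check_password_syntax password → Spec_check_password_syntax password (check_password_syntax password)

-- ===== LEMMAS AND PROOFS =====
theorem pvStep_foldl (l : List Char) (a b c d : Bool) :
    l.foldl pvStep (a, b, c, d) =
      (a || l.any (fun x => PySem.Chars.islower x),
       b || l.any (fun x => PySem.Chars.isupper x),
       c || l.any (fun x => PySem.Chars.isdigit x),
       d || l.any (fun x => decide (x ∈ pvSpecialSymbols))) := by
  induction l generalizing a b c d with
  | nil => simp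
  | cons x xs ih => simp [pvStep, ih, Bool.or_assoc]

theorem check_password_syntax_spec : Claim_equal_check_password_syntax := by
  intro password _
  show check_password_syntax password = check_password_syntax_alt password
  unfold check_password_syntax check_password_syntax_alt
  rw [pvStep_foldl]
  by_cases h1 : password.length < 8
  · simp [PySem.Str.len_eq, h1]
  · by_cases h2 : 30 < password.length
    · simp [PySem.Str.len_eq, h1, h2]
    · cases hl : password.toList.any (fun x => PySem.Chars.islower x) <;>
      cases hu : password.toList.any (fun x => PySem.Chars.isupper x) <;>
      cases hd : password.toList.any (fun x => PySem.Chars.isdigit x) <;>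
      cases hs : password.toList.any (fun x => decide (x ∈ pvSpecialSymbols)) <;>
        simp [PySem.Str.len_eq, h1, h2, hl, hu, hd, hs]
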